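-- pv_equiv track=rewrite | github.com/upesacm/100DaysOfCode-2025 | Quiz_5/Nivedan_590014904/Quiz_5_Debugging_Question_1.py | find_unique_pair
-- ===== SOURCE A (Python) =====
-- def find_unique_pair(arr):
--     xor_sum = 0
--     for num in arr:
--         xor_sum ^= num
--
--     # This isolates the rightmost set bit
--     diff_bit = xor_sum & -xor_sum
--
--     unique1 = 0
--     unique2 = 0
--     for num in arr:
--         # This condition correctly groups numbers
--         """before we're using the AND operation with xor sum which doesnt do anything instead we had to use the diff_bit to XOR with"""
--         if num & diff_bit: #it was this line
--             unique1 ^= num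
--         else:
--             unique2 ^= num
--     return unique1, unique2
-- ===== SOURCE B (Python) =====
-- def find_unique_pair(arr):
--     # cancel equal pairs with a hash set: after the loop, `odd` holds exactly
--     # the values occurring an odd number of times (each once)
--     odd = set()
--     for num in arr:
--         if num in odd:
--             odd.remove(num)
--         else:
--             odd.add(num)
--     xor_sum = 0
--     for num in odd:
--         xor_sum ^= num
--     diff_bit = xor_sum & -xor_sum
--     unique1 = 0
--     for num in odd:
--         if num & diff_bit:
--             unique1 ^= num
--     return unique1, xor_sum ^ unique1
-- ===== Notes on version B (the rewrite author's own statement) =====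
-- stated objective: alternative
-- what changed: B first cancels equal pairs in a hash set (keeping only odd-multiplicity values), then runs the XOR/lowest-bit partition over those distinct survivors with a single accumulator, deriving the second result as xor_sum ^ unique1; A streams two XOR accumulators over the whole array twice.
import Mathlib
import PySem

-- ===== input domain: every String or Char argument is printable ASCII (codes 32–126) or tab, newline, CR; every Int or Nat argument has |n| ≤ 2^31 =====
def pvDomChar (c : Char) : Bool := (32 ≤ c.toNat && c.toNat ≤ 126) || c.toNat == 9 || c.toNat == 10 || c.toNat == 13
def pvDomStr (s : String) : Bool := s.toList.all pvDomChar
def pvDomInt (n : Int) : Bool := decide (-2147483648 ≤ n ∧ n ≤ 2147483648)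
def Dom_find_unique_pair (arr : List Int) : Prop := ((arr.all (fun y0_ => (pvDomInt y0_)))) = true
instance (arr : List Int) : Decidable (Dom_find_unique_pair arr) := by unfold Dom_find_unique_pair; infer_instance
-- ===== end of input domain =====

-- B cancels equal pairs in a hash set first, then partitions only the odd-multiplicity
-- survivors with one accumulator, deriving the second value as xor_sum ^ unique1 (alternative algorithm).

-- ===== PORT A =====
def find_unique_pair (arr : List Int) : Int × Int :=
  let xor_sum := arr.foldl (fun s num => PySem.Int.bxor s num) 0
  let diff_bit := PySem.Int.band xor_sum (-xor_sum)
  let p := arr.foldl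
    (fun (uv : Int × Int) num =>
      if PySem.Int.band num diff_bit ≠ 0 then (PySem.Int.bxor uv.1 num, uv.2)
      else (uv.1, PySem.Int.bxor uv.2 num))
    (0, 0)
  (p.1, p.2)

-- ===== PORT B =====
-- `num in odd` / `odd.remove(num)` / `odd.add(num)` → PySem.Set.contains/discard/add
-- (remove after a successful membership test never raises, so discard is exact here);
-- the XOR folds over the set are order-independent, so Python's hash iteration order is immaterial.
def find_unique_pair_alt (arr : List Int) : Int × Int :=
  let odd : PySem.Set Int := arr.foldl
    (fun s num => if PySem.Set.contains s num then PySem.Set.discard s num else PySem.Set.add s num)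
    PySem.Set.empty
  let xor_sum := odd.foldl (fun s num => PySem.Int.bxor s num) 0
  let diff_bit := PySem.Int.band xor_sum (-xor_sum)
  let unique1 := odd.foldl
    (fun u num => if PySem.Int.band num diff_bit ≠ 0 then PySem.Int.bxor u num else u) 0
  (unique1, PySem.Int.bxor xor_sum unique1)

-- ===== PRECONDITION & SPEC =====
def Spec_find_unique_pair (arr : List Int) (out : Int × Int) : Prop := out = find_unique_pair_alt arr
instance (arr : List Int) (out : Int × Int) : Decidable (Spec_find_unique_pair arr out) := by unfold Spec_find_unique_pair; infer_instance

-- ===== CLAIM (what is proved, stated in full; the proofs are below) =====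
def Claim_equal_find_unique_pair : Prop := ∀ (arr : List Int), Dom_find_unique_pair arr → Spec_find_unique_pair arr (find_unique_pair arr)

-- ===== LEMMAS AND PROOFS =====

-- two's-complement encoding of an Int as (sign, magnitude code)
def pvEnc (p : Bool × Nat) : Int := if p.1 then -(p.2 : Int) - 1 else (p.2 : Int)
def pvDec (a : Int) : Bool × Nat := if 0 ≤ a then (false, a.toNat) else (true, (-a - 1).toNat)

theorem pvDec_pvEnc (p : Bool × Nat) : pvDec (pvEnc p) = p := by
  obtain ⟨s, n⟩ := p
  cases s
  · simp [pvEnc, pvDec]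
  · simp [pvEnc, pvDec]; omega

theorem bxor_eq_enc (a b : Int) :
    PySem.Int.bxor a b = pvEnc (xor (pvDec a).1 (pvDec b).1, (pvDec a).2 ^^^ (pvDec b).2) := by
  unfold PySem.Int.bxor pvDec pvEnc
  split_ifs <;> simp_all <;> omega


theorem bxor_assoc (a b c : Int) :
    PySem.Int.bxor (PySem.Int.bxor a b) c = PySem.Int.bxor a (PySem.Int.bxor b c) := by
  rw [bxor_eq_enc a b, bxor_eq_enc b c, bxor_eq_enc (pvEnc _) c, bxor_eq_enc a (pvEnc _),
    pvDec_pvEnc, pvDec_pvEnc]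
  simp [Nat.xor_assoc]

theorem zero_bxor (a : Int) : PySem.Int.bxor 0 a = a := by
  rw [PySem.Int.bxor_comm]; exact PySem.Int.bxor_zero a

-- generic fold of the shape `acc ⊕ e x`: pull the initial accumulator out
theorem foldl_bxor_init (e : Int → Int) (t : List Int) :
    ∀ a : Int, t.foldl (fun s x => PySem.Int.bxor s (e x)) a
      = PySem.Int.bxor a (t.foldl (fun s x => PySem.Int.bxor s (e x)) 0) := by
  induction t with
  | nil => intro a; simp [PySem.Int.bxor_zero]
  | cons n t ih =>
    intro a
    simp only [List.foldl_cons]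
    rw [ih (PySem.Int.bxor a (e n)), ih (PySem.Int.bxor 0 (e n)), zero_bxor, bxor_assoc]

-- ⊕-folds are invariant under permutation of the list
theorem foldl_bxor_perm (e : Int → Int) {t u : List Int} (h : t.Perm u) (a : Int) :
    t.foldl (fun s x => PySem.Int.bxor s (e x)) a
      = u.foldl (fun s x => PySem.Int.bxor s (e x)) a := by
  haveI : RightCommutative (fun (s x : Int) => PySem.Int.bxor s (e x)) :=
    ⟨fun s x y => by rw [bxor_assoc, bxor_assoc, PySem.Int.bxor_comm (e x) (e y)]⟩
  exact h.foldl_eq a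

-- the ⊕-fold over the toggled set: toggling x flips e x in
theorem foldl_bxor_toggle (e : Int → Int) (S : List Int) (hS : S.Nodup) (x : Int) :
    (if PySem.Set.contains S x then PySem.Set.discard S x else PySem.Set.add S x).foldl
        (fun s y => PySem.Int.bxor s (e y)) 0
      = PySem.Int.bxor (S.foldl (fun s y => PySem.Int.bxor s (e y)) 0) (e x) := by
  by_cases hx : x ∈ S
  · have hc : PySem.Set.contains S x = true := by
      simpa [PySem.Set.contains] using hx
    rw [if_pos hc]
    have hfil : PySem.Set.discard S x = S.erase x := by
      rw [List.Nodup.erase_eq_filter hS]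
      simp only [PySem.Set.discard]
      rfl
    have hperm : S.Perm (x :: S.erase x) := List.perm_cons_erase hx
    rw [hfil]
    have := foldl_bxor_perm e hperm 0
    rw [this]
    simp only [List.foldl_cons]
    rw [foldl_bxor_init e (S.erase x) (PySem.Int.bxor 0 (e x)), zero_bxor, PySem.Int.bxor_comm (e x) _,
      bxor_assoc, PySem.Int.bxor_self, PySem.Int.bxor_zero]
  · have hc : PySem.Set.contains S x = false := by
      simpa [PySem.Set.contains] using hx
    rw [if_neg (by simpa using hx), PySem.Set.add, hc]
    simp only [Bool.false_eq_true, if_false, List.foldl_append, List.foldl_cons, List.foldl_nil]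

-- the toggle fold keeps the set duplicate-free
theorem toggle_nodup (S : List Int) (hS : S.Nodup) (x : Int) :
    (if PySem.Set.contains S x then PySem.Set.discard S x else PySem.Set.add S x).Nodup := by
  by_cases hx : x ∈ S
  · have hc : PySem.Set.contains S x = true := by
      simpa [PySem.Set.contains] using hx
    rw [if_pos hc]
    exact hS.filter _
  · have hc : PySem.Set.contains S x = false := by
      simpa [PySem.Set.contains] using hx
    rw [if_neg (by simpa using hx), PySem.Set.add, hc]
    simp only [Bool.false_eq_true, if_false]
    simp [List.nodup_append, hS]
    intro a ha h
    exact hx (h ▸ ha)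

-- the ⊕-fold over the whole stream equals the ⊕-fold over the odd-multiplicity survivors
theorem foldl_bxor_odd (e : Int → Int) (arr : List Int) :
    ∀ (S : List Int), S.Nodup →
      (arr.foldl (fun s num =>
          if PySem.Set.contains s num then PySem.Set.discard s num else PySem.Set.add s num) S).foldl
            (fun s y => PySem.Int.bxor s (e y)) 0
        = PySem.Int.bxor (S.foldl (fun s y => PySem.Int.bxor s (e y)) 0)
                         (arr.foldl (fun s y => PySem.Int.bxor s (e y)) 0) := by
  induction arr with
  | nil => intro S hS; simp [PySem.Int.bxor_zero]
  | cons x arr ih =>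
    intro S hS
    simp only [List.foldl_cons]
    rw [ih _ (toggle_nodup S hS x), foldl_bxor_toggle e S hS x,
      foldl_bxor_init e arr (PySem.Int.bxor 0 (e x)), zero_bxor, bxor_assoc]

-- A's pair loop is the product of the two scalar loops
theorem pair_loop_split (d : Int) (t : List Int) :
    ∀ a b : Int,
      t.foldl (fun (uv : Int × Int) num =>
          if PySem.Int.band num d ≠ 0 then (PySem.Int.bxor uv.1 num, uv.2)
          else (uv.1, PySem.Int.bxor uv.2 num)) (a, b)
      = (t.foldl (fun u num => if PySem.Int.band num d ≠ 0 then PySem.Int.bxor u num else u) a,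
         t.foldl (fun u num => if PySem.Int.band num d ≠ 0 then u else PySem.Int.bxor u num) b) := by
  induction t with
  | nil => intro a b; simp
  | cons n t ih =>
    intro a b
    simp only [List.foldl_cons]
    by_cases h : PySem.Int.band n d ≠ 0
    · rw [if_pos h, if_pos h, if_pos h]; exact ih _ _
    · rw [if_neg h, if_neg h, if_neg h]; exact ih _ _

-- each scalar loop has the shape `acc ⊕ e x`
theorem g_step_eq (d : Int) :
    (fun (u num : Int) => if PySem.Int.band num d ≠ 0 then PySem.Int.bxor u num else u)
      = fun u num => PySem.Int.bxor u (if PySem.Int.band num d ≠ 0 then num else 0) := by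
  funext u num
  by_cases h : PySem.Int.band num d ≠ 0 <;> simp [h, PySem.Int.bxor_zero]

theorem h_step_eq (d : Int) :
    (fun (u num : Int) => if PySem.Int.band num d ≠ 0 then u else PySem.Int.bxor u num)
      = fun u num => PySem.Int.bxor u (if PySem.Int.band num d ≠ 0 then 0 else num) := by
  funext u num
  by_cases h : PySem.Int.band num d ≠ 0 <;> simp [h, PySem.Int.bxor_zero]

-- the fold splits pointwise over ⊕ in the mapped function
theorem foldl_bxor_split (e1 e2 : Int → Int) (t : List Int) :
    t.foldl (fun s x => PySem.Int.bxor s (PySem.Int.bxor (e1 x) (e2 x))) 0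
      = PySem.Int.bxor (t.foldl (fun s x => PySem.Int.bxor s (e1 x)) 0)
                       (t.foldl (fun s x => PySem.Int.bxor s (e2 x)) 0) := by
  induction t with
  | nil => simp
  | cons n t ih =>
    simp only [List.foldl_cons]
    rw [foldl_bxor_init _ t, foldl_bxor_init e1 t, foldl_bxor_init e2 t, ih,
      zero_bxor, zero_bxor, zero_bxor]
    rw [bxor_assoc, bxor_assoc, ← bxor_assoc (e2 n), PySem.Int.bxor_comm (e2 n) _,
      bxor_assoc _ (e2 n) _]

-- ===== VERDICT (by name: the statement is the Claim_ definition above) =====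
theorem find_unique_pair_spec : Claim_equal_find_unique_pair := by
  intro arr _
  unfold Spec_find_unique_pair find_unique_pair find_unique_pair_alt
  simp only []
  set odd := arr.foldl
    (fun s num => if PySem.Set.contains s num then PySem.Set.discard s num else PySem.Set.add s num)
    PySem.Set.empty with hodd
  -- the total XOR agrees: fold over arr = fold over odd
  have htot : odd.foldl (fun s num => PySem.Int.bxor s num) 0
      = arr.foldl (fun s num => PySem.Int.bxor s num) 0 := by
    have h := foldl_bxor_odd (fun x : Int => x) arr PySem.Set.empty List.nodup_nil
    rw [hodd]
    simpa [PySem.Set.empty, zero_bxor] using h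
  set S := arr.foldl (fun s num => PySem.Int.bxor s num) 0 with hS
  simp only [htot]
  set d := PySem.Int.band S (-S) with hd
  -- masked XOR agrees as well
  have hmask : odd.foldl
      (fun u num => if PySem.Int.band num d ≠ 0 then PySem.Int.bxor u num else u) 0
      = arr.foldl
      (fun u num => if PySem.Int.band num d ≠ 0 then PySem.Int.bxor u num else u) 0 := by
    have h := foldl_bxor_odd (fun x : Int => if PySem.Int.band x d ≠ 0 then x else 0) arr
      PySem.Set.empty List.nodup_nil
    rw [g_step_eq d, hodd]
    simpa [PySem.Set.empty, zero_bxor] using h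
  rw [hmask]
  rw [pair_loop_split]
  set G := arr.foldl (fun u num => if PySem.Int.band num d ≠ 0 then PySem.Int.bxor u num else u) 0
    with hG
  refine Prod.ext rfl ?_
  -- second component: H = S ⊕ G
  have hsplit :
      arr.foldl (fun s num => PySem.Int.bxor s num) 0
        = PySem.Int.bxor
            (arr.foldl (fun u num => if PySem.Int.band num d ≠ 0 then PySem.Int.bxor u num else u) 0)
            (arr.foldl (fun u num => if PySem.Int.band num d ≠ 0 then u else PySem.Int.bxor u num) 0) := by
    rw [g_step_eq d, h_step_eq d, ← foldl_bxor_split]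
    congr 1
    funext s num
    by_cases h : PySem.Int.band num d ≠ 0 <;> simp [h, PySem.Int.bxor_zero, zero_bxor]
  rw [← hG] at hsplit
  rw [← hS] at hsplit
  rw [hsplit, PySem.Int.bxor_comm G _, bxor_assoc, PySem.Int.bxor_self, PySem.Int.bxor_zero]
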